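-- pv_equiv track=rewrite | github.com/denyszamiatin/checkers | checkers.py | get_cells_way_kings
-- ===== SOURCE A (Python) =====
-- def check_on_diagonal(start_row, start_column, end_row, end_column):
--     return True if abs(end_row - start_row) == abs(end_column - start_column) else False
--
-- def get_cells_way_kings(board, start_row, start_column, end_row, end_column):
--     '''
--     Get list cells on way Kings
--     '''
--     way = []
--     for number_row, row in enumerate(board):
--         for number_column, cell in enumerate(row):
--             if check_on_diagonal(start_row, start_column, number_row, number_column) and \
--             check_on_diagonal(number_row, number_column, end_row, end_column) and \
--             (start_row < number_row <= end_row or end_row <= number_row < start_row):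
--                 way.append(cell)
--     return way
-- ===== SOURCE B (Python) =====
-- def get_cells_way_kings(board, start_row, start_column, end_row, end_column):
--     '''Get list cells on way Kings: walk candidate diagonal cells row by row.'''
--     if start_row < end_row:
--         lo, hi = start_row + 1, end_row
--     elif end_row < start_row:
--         lo, hi = end_row, start_row - 1
--     else:
--         return []
--     way = []
--     for r in range(max(lo, 0), min(hi, len(board) - 1) + 1):
--         d = abs(r - start_row)
--         row = board[r]
--         for c in (start_column - d, start_column + d):
--             if 0 <= c < len(row) and abs(end_row - r) == abs(end_column - c):
--                 way.append(row[c])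
--     return way
-- ===== Notes on version B (the rewrite author's own statement) =====
-- stated objective: faster
-- what changed: Instead of scanning every cell of the board and testing both diagonal conditions, B clips the row interval between start_row and end_row to the board and, for each row in it, directly checks only the two candidate columns start_column +/- |row - start_row| on the start diagonal.
import Mathlib
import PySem

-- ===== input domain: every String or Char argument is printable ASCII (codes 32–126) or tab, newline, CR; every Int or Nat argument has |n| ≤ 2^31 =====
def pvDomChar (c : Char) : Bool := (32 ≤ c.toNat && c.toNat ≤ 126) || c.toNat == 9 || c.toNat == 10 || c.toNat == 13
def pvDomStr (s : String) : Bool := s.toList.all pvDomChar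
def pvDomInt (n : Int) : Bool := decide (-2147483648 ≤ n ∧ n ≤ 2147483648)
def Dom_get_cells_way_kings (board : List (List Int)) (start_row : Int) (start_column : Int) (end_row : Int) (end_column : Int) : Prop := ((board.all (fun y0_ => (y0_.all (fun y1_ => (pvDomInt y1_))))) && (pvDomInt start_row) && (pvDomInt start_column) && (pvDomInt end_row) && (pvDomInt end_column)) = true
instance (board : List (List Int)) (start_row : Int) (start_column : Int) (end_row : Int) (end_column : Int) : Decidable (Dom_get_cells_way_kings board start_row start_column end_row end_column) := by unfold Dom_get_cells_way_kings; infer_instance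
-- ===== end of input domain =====

-- B walks only the candidate diagonal cells row by row (O(rows)) instead of scanning every board cell (A is O(rows·cols)); return values proved equal.

-- ===== PORT A =====
def check_on_diagonal (start_row : Int) (start_column : Int) (end_row : Int) (end_column : Int) : Bool :=
  if |end_row - start_row| = |end_column - start_column| then true else false

def get_cells_way_kings (board : List (List Int)) (start_row : Int) (start_column : Int) (end_row : Int) (end_column : Int) : List Int :=
  (PySem.List.enumerate board).foldl (fun way p =>
    (PySem.List.enumerate p.2).foldl (fun way q =>
      if check_on_diagonal start_row start_column p.1 q.1 = true ∧
         check_on_diagonal p.1 q.1 end_row end_column = true ∧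
         ((start_row < p.1 ∧ p.1 ≤ end_row) ∨ (end_row ≤ p.1 ∧ p.1 < start_row))
      then way ++ [q.2] else way) way) []

-- ===== PORT B =====
-- helper for B: the loop 'for r in range(max(lo,0), min(hi, len(board)-1)+1)'
def pvAltRows (board : List (List Int)) (start_row : Int) (start_column : Int) (end_row : Int) (end_column : Int) (lo : Int) (hi : Int) : List Int :=
  (PySem.List.pyRange (max lo 0) (min hi (PySem.List.len board - 1) + 1) 1).foldl (fun way r =>
    let d := |r - start_row|
    let row := PySem.List.pyGetD board r []
    [start_column - d, start_column + d].foldl (fun way c =>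
      if 0 ≤ c ∧ c < PySem.List.len row ∧ |end_row - r| = |end_column - c|
      then way ++ [PySem.List.pyGetD row c 0] else way) way) []

def get_cells_way_kings_alt (board : List (List Int)) (start_row : Int) (start_column : Int) (end_row : Int) (end_column : Int) : List Int :=
  if start_row < end_row then pvAltRows board start_row start_column end_row end_column (start_row + 1) end_row
  else if end_row < start_row then pvAltRows board start_row start_column end_row end_column end_row (start_row - 1)
  else []

-- ===== PRECONDITION & SPEC =====
def Spec_get_cells_way_kings (board : List (List Int)) (start_row : Int) (start_column : Int) (end_row : Int) (end_column : Int) (out : List Int) : Prop := out = get_cells_way_kings_alt board start_row start_column end_row end_column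
instance (board : List (List Int)) (start_row : Int) (start_column : Int) (end_row : Int) (end_column : Int) (out : List Int) : Decidable (Spec_get_cells_way_kings board start_row start_column end_row end_column out) := by unfold Spec_get_cells_way_kings; infer_instance

-- ===== CLAIM (what is proved, stated in full; the proofs are below) =====
def Claim_equal_get_cells_way_kings : Prop := ∀ (board : List (List Int)) (start_row : Int) (start_column : Int) (end_row : Int) (end_column : Int), Dom_get_cells_way_kings board start_row start_column end_row end_column → Spec_get_cells_way_kings board start_row start_column end_row end_column (get_cells_way_kings board start_row start_column end_row end_column)

-- ===== LEMMAS AND PROOFS =====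

lemma pvCheck_iff (a b c d : Int) : check_on_diagonal a b c d = true ↔ |c - a| = |d - b| := by
  unfold check_on_diagonal
  split_ifs with h <;> simp [h]

-- selecting the cell with column index c from a row, guarded by the end-diagonal test
def pvPick (end_row end_column r : Int) (row : List Int) (c : Int) : List Int :=
  if 0 ≤ c ∧ c < PySem.List.len row ∧ |end_row - r| = |end_column - c| then [PySem.List.pyGetD row c 0] else []

-- A's per-row filtered cells
def pvRowA (start_row start_column end_row end_column r : Int) (row : List Int) : List Int :=
  ((PySem.List.enumerate row).filter (fun q => decide
      (check_on_diagonal start_row start_column r q.1 = true ∧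
       check_on_diagonal r q.1 end_row end_column = true ∧
       ((start_row < r ∧ r ≤ end_row) ∨ (end_row ≤ r ∧ r < start_row))))).map (·.2)

lemma pvA_flatMap (board : List (List Int)) (sr sc er ec : Int) :
    get_cells_way_kings board sr sc er ec
      = (PySem.List.pyRange 0 (board.length : Int) 1).flatMap
          (fun r => pvRowA sr sc er ec r (PySem.List.pyGetD board r [])) := by
  unfold get_cells_way_kings
  have hbody : (fun (way : List Int) (p : Int × List Int) =>
      (PySem.List.enumerate p.2).foldl (fun way q =>
        if check_on_diagonal sr sc p.1 q.1 = true ∧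
           check_on_diagonal p.1 q.1 er ec = true ∧
           ((sr < p.1 ∧ p.1 ≤ er) ∨ (er ≤ p.1 ∧ p.1 < sr))
        then way ++ [q.2] else way) way)
      = fun way p => way ++ pvRowA sr sc er ec p.1 p.2 := by
    funext way p
    rw [PySem.List.foldl_append_ite]
    rfl
  rw [hbody, PySem.List.foldl_append_eq_flatMap, List.nil_append,
      PySem.List.enumerate_eq_map_pyRange board [], List.flatMap_map, PySem.List.len_eq]

lemma pvB_flatMap (board : List (List Int)) (sr sc er ec lo hi : Int) :
    pvAltRows board sr sc er ec lo hi
      = (PySem.List.pyRange (max lo 0) (min hi ((board.length : Int) - 1) + 1) 1).flatMap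
          (fun r => pvPick er ec r (PySem.List.pyGetD board r []) (sc - |r - sr|)
                    ++ pvPick er ec r (PySem.List.pyGetD board r []) (sc + |r - sr|)) := by
  unfold pvAltRows
  rw [PySem.List.len_eq]
  have hbody : (fun (way : List Int) (r : Int) =>
      let d := |r - sr|
      let row := PySem.List.pyGetD board r []
      [sc - d, sc + d].foldl (fun way c =>
        if 0 ≤ c ∧ c < PySem.List.len row ∧ |er - r| = |ec - c|
        then way ++ [PySem.List.pyGetD row c 0] else way) way)
      = fun way r => way ++ (pvPick er ec r (PySem.List.pyGetD board r []) (sc - |r - sr|)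
                             ++ pvPick er ec r (PySem.List.pyGetD board r []) (sc + |r - sr|)) := by
    funext way r
    simp only [List.foldl_cons, List.foldl_nil]
    unfold pvPick
    split_ifs <;> simp
  rw [hbody, PySem.List.foldl_append_eq_flatMap, List.nil_append]

-- single-target filter over an enumeration
lemma pvL1 (er ec r : Int) : ∀ (row : List Int) (s x : Int),
    ((PySem.List.enumerate row s).filter (fun q => q.1 == x && decide (|er - r| = |ec - q.1|))).map (·.2)
      = if s ≤ x ∧ x < s + row.length ∧ |er - r| = |ec - x| then [PySem.List.pyGetD row (x - s) 0] else [] := by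
  intro row
  induction row with
  | nil =>
    intro s x
    rw [if_neg (by rintro ⟨h1, h2, _⟩; simp at h2; omega)]
    simp [PySem.List.enumerate_nil]
  | cons v row ih =>
    intro s x
    rw [PySem.List.enumerate_cons]
    by_cases hx : s = x
    · subst hx
      by_cases hP : |er - r| = |ec - s|
      · rw [List.filter_cons_of_pos (by simp [hP]), List.map_cons, ih,
            if_neg (by rintro ⟨h1, -, -⟩; omega),
            if_pos ⟨le_refl s, by simp only [List.length_cons]; push_cast; omega, hP⟩]
        simp [PySem.List.pyGetD_zero_cons]
      · rw [List.filter_cons_of_neg (by simp [hP]), ih,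
            if_neg (by rintro ⟨h1, -, -⟩; omega),
            if_neg (by rintro ⟨-, -, h3⟩; exact hP h3)]
    · rw [List.filter_cons_of_neg (by simp [hx]), ih]
      by_cases hc : s + 1 ≤ x ∧ x < s + 1 + (row.length : Int) ∧ |er - r| = |ec - x|
      · rw [if_pos hc, if_pos ⟨by omega, by simp only [List.length_cons]; push_cast; omega, hc.2.2⟩]
        have h0 : (0:Int) ≤ x - s := by omega
        have h1 : x - s < ((v :: row).length : Int) := by simp only [List.length_cons]; push_cast; omega
        have h2 : (0:Int) ≤ x - (s+1) := by omega
        have h3 : x - (s+1) < (row.length : Int) := by omega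
        rw [PySem.List.pyGetD_eq_getElem row 0 h2 h3, PySem.List.pyGetD_eq_getElem (v :: row) 0 h0 h1]
        have hn : (x - s).toNat = (x - (s+1)).toNat + 1 := by omega
        simp [hn]
      · rw [if_neg hc, if_neg (by rintro ⟨a1, a2, a3⟩; simp only [List.length_cons] at a2; push_cast at a2; exact hc ⟨by omega, by omega, a3⟩)]


-- a two-target filter splits, smaller target first
lemma pvL2 (er ec r : Int) : ∀ (row : List Int) (s a b : Int), a < b →
    ((PySem.List.enumerate row s).filter (fun q => (q.1 == a || q.1 == b) && decide (|er - r| = |ec - q.1|))).map (·.2)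
      = ((PySem.List.enumerate row s).filter (fun q => q.1 == a && decide (|er - r| = |ec - q.1|))).map (·.2)
        ++ ((PySem.List.enumerate row s).filter (fun q => q.1 == b && decide (|er - r| = |ec - q.1|))).map (·.2) := by
  intro row
  induction row with
  | nil => intro s a b _; simp [PySem.List.enumerate_nil]
  | cons v row ih =>
    intro s a b hab
    rw [PySem.List.enumerate_cons]
    by_cases hP : |er - r| = |ec - s|
    · by_cases ha : s = a
      · subst ha
        rw [List.filter_cons_of_pos (by simp [hP]), List.filter_cons_of_pos (by simp [hP]),
            List.filter_cons_of_neg (by simp; omega), List.map_cons, List.map_cons, ih _ _ _ hab,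
            List.cons_append]
      · by_cases hb : s = b
        · subst hb
          rw [List.filter_cons_of_pos (by simp [hP]), List.filter_cons_of_neg (by simp [ha]),
              List.filter_cons_of_pos (by simp [hP]), List.map_cons, List.map_cons, ih _ _ _ hab,
              pvL1, pvL1, if_neg (by rintro ⟨h1, -, -⟩; omega), if_neg (by rintro ⟨h1, -, -⟩; omega)]
          simp
        · rw [List.filter_cons_of_neg (by simp [ha, hb]), List.filter_cons_of_neg (by simp [ha]),
              List.filter_cons_of_neg (by simp [hb]), ih _ _ _ hab]
    · rw [List.filter_cons_of_neg (by simp [hP]), List.filter_cons_of_neg (by simp [hP]),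
          List.filter_cons_of_neg (by simp [hP]), ih _ _ _ hab]


lemma pvRowA_of_range (sr sc er ec r : Int) (row : List Int)
    (hr : (sr < r ∧ r ≤ er) ∨ (er ≤ r ∧ r < sr)) :
    pvRowA sr sc er ec r row = pvPick er ec r row (sc - |r - sr|) ++ pvPick er ec r row (sc + |r - sr|) := by
  have hd : 0 < |r - sr| := abs_pos.mpr (by omega)
  unfold pvRowA
  rw [List.filter_congr (q := fun q => (q.1 == sc - |r - sr| || q.1 == sc + |r - sr|) && decide (|er - r| = |ec - q.1|)) (by
        intro q _
        rw [Bool.eq_iff_iff]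
        simp only [Bool.and_eq_true, Bool.or_eq_true, beq_iff_eq, decide_eq_true_eq, pvCheck_iff]
        simp only [Int.abs_eq_natAbs] at *
        omega),
      pvL2 er ec r row 0 _ _ (by omega), pvL1, pvL1]
  unfold pvPick
  rw [PySem.List.len_eq]
  norm_num

lemma pvRowA_of_not_range (sr sc er ec r : Int) (row : List Int)
    (hr : ¬ ((sr < r ∧ r ≤ er) ∨ (er ≤ r ∧ r < sr))) :
    pvRowA sr sc er ec r row = [] := by
  unfold pvRowA
  rw [List.filter_eq_nil_iff.mpr (by intro q hq; simp [hr]), List.map_nil]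

lemma pvShrink (n a b : Int) (F : Int → List Int) (h0 : 0 ≤ a) (hbn : b ≤ n)
    (hF : ∀ r : Int, 0 ≤ r → r < n → (r < a ∨ b ≤ r) → F r = []) :
    (PySem.List.pyRange 0 n 1).flatMap F = (PySem.List.pyRange a b 1).flatMap F := by
  by_cases hab : a ≤ b
  · have e1 : (PySem.List.pyRange 0 a 1).flatMap F = [] := by
      refine List.flatMap_eq_nil_iff.mpr ?_
      intro x hx
      rw [PySem.List.mem_pyRange_one] at hx
      exact hF x hx.1 (by omega) (Or.inl hx.2)
    have e3 : (PySem.List.pyRange b n 1).flatMap F = [] := by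
      refine List.flatMap_eq_nil_iff.mpr ?_
      intro x hx
      rw [PySem.List.mem_pyRange_one] at hx
      exact hF x (by omega) hx.2 (Or.inr hx.1)
    rw [PySem.List.pyRange_one_append 0 a n h0 (le_trans hab hbn), List.flatMap_append,
        PySem.List.pyRange_one_append a b n hab hbn, List.flatMap_append, e1, e3]
    simp
  · rw [PySem.List.pyRange_one_eq_nil (b := b) (by omega),
        List.flatMap_eq_nil_iff.mpr (by
          intro x hx
          rw [PySem.List.mem_pyRange_one] at hx
          exact hF x hx.1 hx.2 (by omega))]
    rfl

lemma pvMain (board : List (List Int)) (sr sc er ec : Int) :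
    get_cells_way_kings board sr sc er ec = get_cells_way_kings_alt board sr sc er ec := by
  unfold get_cells_way_kings_alt
  rw [pvA_flatMap]
  by_cases h1 : sr < er
  · rw [if_pos h1, pvB_flatMap,
        pvShrink (board.length : Int) (max (sr + 1) 0) (min er ((board.length : Int) - 1) + 1)
          _ (by omega) (by omega) (by
            intro x hx0 hxn hout
            exact pvRowA_of_not_range sr sc er ec x _ (by omega)),
        List.flatMap_def, List.flatMap_def]
    refine congrArg List.flatten (List.map_congr_left ?_)
    intro x hx
    rw [PySem.List.mem_pyRange_one] at hx
    exact pvRowA_of_range sr sc er ec x _ (by omega)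
  · rw [if_neg h1]
    by_cases h2 : er < sr
    · rw [if_pos h2, pvB_flatMap,
          pvShrink (board.length : Int) (max er 0) (min (sr - 1) ((board.length : Int) - 1) + 1)
            _ (by omega) (by omega) (by
              intro x hx0 hxn hout
              exact pvRowA_of_not_range sr sc er ec x _ (by omega)),
          List.flatMap_def, List.flatMap_def]
      refine congrArg List.flatten (List.map_congr_left ?_)
      intro x hx
      rw [PySem.List.mem_pyRange_one] at hx
      exact pvRowA_of_range sr sc er ec x _ (by omega)
    · rw [if_neg h2]
      refine List.flatMap_eq_nil_iff.mpr ?_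
      intro x hx
      exact pvRowA_of_not_range sr sc er ec x _ (by omega)

-- ===== VERDICT (by name: the statement is the Claim_ definition above) =====
theorem get_cells_way_kings_spec : Claim_equal_get_cells_way_kings := by
  intro board sr sc er ec _
  exact pvMain board sr sc er ec
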